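-- pv_equiv track=rewrite | github.com/kdavila/lecturemath | ACCESS2021_release/lecturenet_eval_segments.py | match_split_points
-- ===== SOURCE A (Python) =====
-- def match_split_points(gt_split_points, pred_split_points, max_match_gap):
--     all_pairs = []
--     for gt_split in gt_split_points:
--         for pred_split in pred_split_points:
--             dist = abs(gt_split - pred_split)
--
--             all_pairs.append((dist, gt_split, pred_split))
--
--     all_pairs = sorted(all_pairs)
--
--     gt_matched = {}
--     pred_matched = {}
--     matches = []
--     for dist, gt_split, pred_split in all_pairs:
--         if dist < max_match_gap:
--             if gt_split not in gt_matched and pred_split not in pred_matched: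
--                 gt_matched[gt_split] = True
--                 pred_matched[pred_split] = True
--
--                 matches.append((gt_split, pred_split))
--         else:
--             # no more matches can be found after this point
--             break
--
--     return matches
-- ===== SOURCE B (Python) =====
-- def match_split_points(gt_split_points, pred_split_points, max_match_gap):
--     # Repeatedly extract the globally closest still-available (gt, pred) pair
--     # and delete both endpoints from the working lists; no sorting, no "used" sets.
--     gts = list(gt_split_points)
--     preds = list(pred_split_points)
--     matches = []
--     while True:
--         cands = [(abs(g - p), g, p)
--                  for g in gts
--                  for p in preds
--                  if abs(g - p) < max_match_gap]
--         if not cands: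
--             break
--         _, g, p = min(cands)
--         matches.append((g, p))
--         gts = [x for x in gts if x != g]
--         preds = [x for x in preds if x != p]
--     return matches
-- ===== Notes on version B (the rewrite author's own statement) =====
-- stated objective: alternative
-- what changed: B never sorts and keeps no matched-sets: it repeatedly scans the remaining gt/pred lists for the globally closest in-gap pair, appends it, and deletes both endpoints from the lists, until no in-gap pair remains; A instead sorts all n*m pairs once and does one greedy pass with matched-dicts.
import Mathlib
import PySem

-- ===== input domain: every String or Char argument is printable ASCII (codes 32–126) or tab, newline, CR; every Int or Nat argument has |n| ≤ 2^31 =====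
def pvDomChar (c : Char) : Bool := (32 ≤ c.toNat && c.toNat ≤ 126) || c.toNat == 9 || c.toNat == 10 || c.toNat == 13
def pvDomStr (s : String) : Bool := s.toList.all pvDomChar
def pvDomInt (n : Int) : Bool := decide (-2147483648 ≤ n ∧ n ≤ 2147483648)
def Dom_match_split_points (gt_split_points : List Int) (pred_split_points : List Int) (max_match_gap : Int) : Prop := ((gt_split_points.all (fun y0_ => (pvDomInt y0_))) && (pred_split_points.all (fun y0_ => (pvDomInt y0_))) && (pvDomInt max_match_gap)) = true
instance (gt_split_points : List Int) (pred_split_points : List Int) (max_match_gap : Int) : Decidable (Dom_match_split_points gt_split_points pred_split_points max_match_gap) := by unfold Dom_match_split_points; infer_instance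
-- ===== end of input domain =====

-- B replaces A's sort-all-pairs-then-greedy-pass-with-matched-dicts by repeated extraction of the
-- globally closest in-gap pair from shrinking candidate lists (no sort, no matched sets); proved equal.


-- Python's default tuple comparison on (dist, gt, pred) is lexicographic: model it with the Lex key.
def mspKey (t : Int × Int × Int) : Int ×ₗ (Int ×ₗ Int) := toLex (t.1, toLex t.2)

-- ===== PORT A =====
-- the `for dist, gt_split, pred_split in all_pairs: … else: break` loop of A
def mspLoopA (max_match_gap : Int) : List (Int × Int × Int) → PySem.Dict Int Bool → PySem.Dict Int Bool → List (Int × Int) → List (Int × Int)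
  | [], _, _, ms => ms
  | (dist, gt_split, pred_split) :: rest, gt_matched, pred_matched, ms =>
    if dist < max_match_gap then
      if !(gt_matched.contains gt_split) && !(pred_matched.contains pred_split) then
        mspLoopA max_match_gap rest (gt_matched.insert gt_split true)
          (pred_matched.insert pred_split true) (ms ++ [(gt_split, pred_split)])
      else
        mspLoopA max_match_gap rest gt_matched pred_matched ms
    else
      ms

def match_split_points (gt_split_points : List Int) (pred_split_points : List Int) (max_match_gap : Int) : List (Int × Int) :=
  let all_pairs := gt_split_points.flatMap (fun gt_split =>
    pred_split_points.map (fun pred_split => (|gt_split - pred_split|, gt_split, pred_split)))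
  let all_pairs := PySem.List.sorted all_pairs mspKey false
  mspLoopA max_match_gap all_pairs PySem.Dict.empty PySem.Dict.empty []

-- ===== PORT B =====
-- the `cands = [(abs(g-p), g, p) for g in gts for p in preds if abs(g-p) < max_match_gap]` comprehension
def mspCands (gap : Int) (G P : List Int) : List (Int × Int × Int) :=
  G.flatMap (fun g => (P.filter (fun p => |g - p| < gap)).map (fun p => (|g - p|, g, p)))

-- candidates only come from the current lists (used for the termination of the while loop)
theorem msp_mem_cands {gap : Int} {G P : List Int} {t : Int × Int × Int}
    (h : t ∈ mspCands gap G P) : t.2.1 ∈ G ∧ t.2.2 ∈ P := by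
  simp only [mspCands, List.mem_flatMap, List.mem_map, List.mem_filter] at h
  obtain ⟨g, hg, p, ⟨hp, _⟩, rfl⟩ := h
  exact ⟨hg, hp⟩

-- Source B's `while True:` loop; each round extracts min(cands) and deletes both endpoints
def match_split_points_alt (gt_split_points : List Int) (pred_split_points : List Int) (max_match_gap : Int) : List (Int × Int) :=
  match h : PySem.List.min? (mspCands max_match_gap gt_split_points pred_split_points) mspKey with
  | none => []
  | some t =>
    (t.2.1, t.2.2) ::
      match_split_points_alt (gt_split_points.filter (fun x => x ≠ t.2.1))
        (pred_split_points.filter (fun x => x ≠ t.2.2)) max_match_gap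
termination_by gt_split_points.length
decreasing_by
  have hm := (msp_mem_cands (PySem.List.min?_mem h)).1
  simp only [List.length_unattach]
  refine lt_of_lt_of_le
    (List.length_filter_lt_length_iff_exists.2 ⟨⟨t.2.1, hm⟩, List.mem_attach _ _, ?_⟩)
    (le_of_eq List.length_attach)
  simp

-- ===== PRECONDITION & SPEC =====
def Spec_match_split_points (gt_split_points : List Int) (pred_split_points : List Int) (max_match_gap : Int) (out : List (Int × Int)) : Prop := out = match_split_points_alt gt_split_points pred_split_points max_match_gap
instance (gt_split_points : List Int) (pred_split_points : List Int) (max_match_gap : Int) (out : List (Int × Int)) : Decidable (Spec_match_split_points gt_split_points pred_split_points max_match_gap out) := by unfold Spec_match_split_points; infer_instance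

-- ===== CLAIM (what is proved, stated in full; the proofs are below) =====
def Claim_equal_match_split_points : Prop := ∀ (gt_split_points : List Int) (pred_split_points : List Int) (max_match_gap : Int), Dom_match_split_points gt_split_points pred_split_points max_match_gap → Spec_match_split_points gt_split_points pred_split_points max_match_gap (match_split_points gt_split_points pred_split_points max_match_gap)

-- ===== LEMMAS AND PROOFS =====

theorem mspKey_injective : Function.Injective mspKey := by
  intro a b h
  simp [mspKey, Prod.ext_iff] at h
  exact Prod.ext h.1 (Prod.ext h.2.1 h.2.2)

-- A's greedy pass, seen as head-commit-then-discard-conflicts on the (sorted) candidate list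
def mspGreedy : List (Int × Int × Int) → List (Int × Int)
  | [] => []
  | (_, g, p) :: rest =>
    (g, p) :: mspGreedy (rest.filter (fun t => !(t.2.1 == g) && !(t.2.2 == p)))
termination_by l => l.length
decreasing_by simpa [Nat.lt_succ_iff] using List.length_filter_le _ rest.attach

-- proof-only: the step function of A's pass, as a fold
def mspStepB (st : PySem.Set Int × PySem.Set Int × List (Int × Int)) (t : Int × Int × Int) :
    PySem.Set Int × PySem.Set Int × List (Int × Int) :=
  if !(PySem.Set.contains st.1 t.2.1) && !(PySem.Set.contains st.2.1 t.2.2) then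
    (PySem.Set.add st.1 t.2.1, PySem.Set.add st.2.1 t.2.2, st.2.2 ++ [(t.2.1, t.2.2)])
  else st

-- B's candidate pairs are exactly A's pairs filtered to dist < gap.
theorem msp_raw_filter (gts preds : List Int) (gap : Int) :
    mspCands gap gts preds
      = (gts.flatMap (fun g => preds.map (fun p => (|g - p|, g, p)))).filter
          (fun t => decide (t.1 < gap)) := by
  induction gts with
  | nil => rfl
  | cons g gts ih =>
    simp only [mspCands, List.flatMap_cons, List.filter_append] at ih ⊢
    rw [ih]
    congr 1
    rw [List.filter_map]
    exact congrArg _ (List.filter_congr (fun p _ => rfl))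

-- stable sort commutes with filter (key injective)
theorem msp_sorted_filter (xs : List (Int × Int × Int)) (q : Int × Int × Int → Bool) :
    PySem.List.sorted (xs.filter q) mspKey false = (PySem.List.sorted xs mspKey false).filter q :=
  PySem.List.eq_of_perm_of_pairwise_le_of_injective mspKey mspKey_injective
    ((PySem.List.sorted_perm _ _ _).trans ((PySem.List.sorted_perm xs mspKey false).filter q).symm)
    (PySem.List.sorted_pairwise _ _)
    ((PySem.List.sorted_pairwise xs mspKey).filter q)

theorem msp_fst_le_of_key_le (a b : Int × Int × Int) (h : mspKey a ≤ mspKey b) : a.1 ≤ b.1 := by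
  rcases Prod.Lex.le_iff.1 h with h1 | h1
  · exact le_of_lt h1
  · exact le_of_eq h1.1

-- on a list sorted by dist, the dist < gap prefix is the dist < gap filter
theorem msp_filter_eq_takeWhile (gap : Int) (l : List (Int × Int × Int))
    (hl : l.Pairwise (fun a b => a.1 ≤ b.1)) :
    l.filter (fun t => decide (t.1 < gap)) = l.takeWhile (fun t => decide (t.1 < gap)) := by
  induction l with
  | nil => rfl
  | cons a l ih =>
    rcases List.pairwise_cons.1 hl with ⟨ha, hl'⟩
    by_cases hq : a.1 < gap
    · simp [hq, ih hl']
    · have hnil : l.filter (fun t => decide (t.1 < gap)) = [] := by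
        rw [List.filter_eq_nil_iff]
        intro b hb
        simp only [decide_eq_true_eq]
        exact fun hb' => hq (lt_of_le_of_lt (ha b hb) hb')
      simp [hq, hnil]

theorem msp_set_contains_add (s : PySem.Set Int) (g x : Int) :
    PySem.Set.contains (PySem.Set.add s g) x = (x == g || PySem.Set.contains s x) := by
  rw [Bool.eq_iff_iff]
  simp [PySem.Set.mem_add, or_comm]

-- A's break-loop over dicts equals the fold over sets, on the dist < gap prefix.
theorem msp_loop_eq (gap : Int) (l : List (Int × Int × Int))
    (gtM predM : PySem.Dict Int Bool) (gtS predS : PySem.Set Int) (ms : List (Int × Int))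
    (hg : ∀ x : Int, gtM.contains x = PySem.Set.contains gtS x)
    (hp : ∀ x : Int, predM.contains x = PySem.Set.contains predS x) :
    mspLoopA gap l gtM predM ms
      = ((l.takeWhile (fun t => decide (t.1 < gap))).foldl mspStepB (gtS, predS, ms)).2.2 := by
  induction l generalizing gtM predM gtS predS ms with
  | nil => simp [mspLoopA]
  | cons t rest ih =>
    obtain ⟨d, g, p⟩ := t
    by_cases hd : d < gap
    · rw [List.takeWhile_cons_of_pos (by simpa using hd)]
      simp only [mspLoopA, List.foldl_cons]
      rw [if_pos hd]
      by_cases hm : (!(gtM.contains g) && !(predM.contains p)) = true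
      · have hm' : (!(PySem.Set.contains gtS g) && !(PySem.Set.contains predS p)) = true := by
          rw [← hg, ← hp]; exact hm
        have hstep : mspStepB (gtS, predS, ms) (d, g, p)
            = (PySem.Set.add gtS g, PySem.Set.add predS p, ms ++ [(g, p)]) := by
          simp only [mspStepB]
          rw [if_pos hm']
        rw [if_pos hm, hstep]
        exact ih _ _ _ _ _
          (fun x => by rw [PySem.Dict.contains_insert, msp_set_contains_add, hg])
          (fun x => by rw [PySem.Dict.contains_insert, msp_set_contains_add, hp])
      · have hm' : ¬ (!(PySem.Set.contains gtS g) && !(PySem.Set.contains predS p)) = true := by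
          rw [← hg, ← hp]; exact hm
        have hstep : mspStepB (gtS, predS, ms) (d, g, p) = (gtS, predS, ms) := by
          simp only [mspStepB]
          rw [if_neg hm']
        rw [if_neg hm, hstep]
        exact ih _ _ _ _ _ hg hp
    · rw [List.takeWhile_cons_of_neg (by simpa using hd)]
      simp [mspLoopA, hd]

-- the set-fold equals the head-commit greedy on the conflict-filtered list
theorem msp_fold_greedy (l : List (Int × Int × Int)) (S T : PySem.Set Int) (acc : List (Int × Int)) :
    (l.foldl mspStepB (S, T, acc)).2.2
      = acc ++ mspGreedy (l.filter (fun t =>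
          !(PySem.Set.contains S t.2.1) && !(PySem.Set.contains T t.2.2))) := by
  induction l generalizing S T acc with
  | nil => simp [mspGreedy]
  | cons t rest ih =>
    obtain ⟨d, g, p⟩ := t
    by_cases hm : (!(PySem.Set.contains S g) && !(PySem.Set.contains T p)) = true
    · rw [List.filter_cons_of_pos (by simpa using hm)]
      simp only [List.foldl_cons]
      have hstep : mspStepB (S, T, acc) (d, g, p)
          = (PySem.Set.add S g, PySem.Set.add T p, acc ++ [(g, p)]) := by
        simp only [mspStepB]; rw [if_pos hm]
      have hfil : ((rest.filter (fun t =>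
            !(PySem.Set.contains S t.2.1) && !(PySem.Set.contains T t.2.2))).filter
              (fun t => !(t.2.1 == g) && !(t.2.2 == p)))
          = rest.filter (fun t =>
            !(PySem.Set.contains (PySem.Set.add S g) t.2.1)
              && !(PySem.Set.contains (PySem.Set.add T p) t.2.2)) := by
        rw [List.filter_filter]
        apply List.filter_congr
        intro t _
        rw [Bool.eq_iff_iff]
        simp only [msp_set_contains_add, Bool.and_eq_true, Bool.not_eq_true',
          Bool.or_eq_false_iff, beq_eq_false_iff_ne]
        tauto
      rw [hstep, ih, mspGreedy, hfil, List.append_assoc, List.singleton_append]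
    · rw [List.filter_cons_of_neg (by simpa using hm)]
      simp only [List.foldl_cons]
      have hstep : mspStepB (S, T, acc) (d, g, p) = (S, T, acc) := by
        simp only [mspStepB]; rw [if_neg hm]
      rw [hstep, ih]

-- deleting the matched endpoints from the point lists = filtering the candidate list on both coords
theorem msp_cands_filter (gap : Int) (G P : List Int) (g p : Int) :
    mspCands gap (G.filter (fun x => x ≠ g)) (P.filter (fun x => x ≠ p))
      = (mspCands gap G P).filter (fun t => !(t.2.1 == g) && !(t.2.2 == p)) := by
  induction G with
  | nil => rfl
  | cons g' G ih =>
    by_cases hg : g' = g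
    · subst hg
      have h1 : (g' :: G).filter (fun x => x ≠ g') = G.filter (fun x => x ≠ g') := by
        simp
      have h2 : ((P.filter (fun q => |g' - q| < gap)).map (fun q => (|g' - q|, g', q))).filter
          (fun t => !(t.2.1 == g') && !(t.2.2 == p)) = [] := by
        simp [List.filter_map, Function.comp]
      calc mspCands gap ((g' :: G).filter (fun x => x ≠ g')) (P.filter (fun x => x ≠ p))
          = (mspCands gap G P).filter (fun t => !(t.2.1 == g') && !(t.2.2 == p)) := by
            rw [h1, ih]
        _ = (mspCands gap (g' :: G) P).filter (fun t => !(t.2.1 == g') && !(t.2.2 == p)) := by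
            simp only [mspCands, List.flatMap_cons, List.filter_append, h2, List.nil_append]
    · have h1 : (g' :: G).filter (fun x => x ≠ g) = g' :: G.filter (fun x => x ≠ g) := by
        simp [hg]
      have hblock : ((P.filter (fun x => x ≠ p)).filter (fun q0 => decide (|g' - q0| < gap))).map
            (fun q0 => (|g' - q0|, g', q0))
          = ((P.filter (fun q0 => decide (|g' - q0| < gap))).map
              (fun q0 => (|g' - q0|, g', q0))).filter
              (fun t => !(t.2.1 == g) && !(t.2.2 == p)) := by
        rw [List.filter_map, List.filter_filter, List.filter_filter]
        congr 1
        apply List.filter_congr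
        intro q0 _
        have hbg : (g' == g) = false := by simp [hg]
        simp [Function.comp, hbg, Bool.and_comm, beq_eq_decide]
      simp only [mspCands, h1, List.flatMap_cons, List.filter_append] at ih ⊢
      rw [ih, hblock]

-- the head-commit greedy on the sorted candidate list = B's repeated min extraction
theorem msp_greedy_extract (gap : Int) :
    ∀ (n : Nat) (G P : List Int), G.length ≤ n →
      mspGreedy (PySem.List.sorted (mspCands gap G P) mspKey false)
        = match_split_points_alt G P gap := by
  intro n
  induction n with
  | zero =>
    intro G P hG
    have hGnil : G = [] := List.length_eq_zero_iff.1 (Nat.le_zero.1 hG)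
    subst hGnil
    have hc : mspCands gap [] P = [] := rfl
    unfold match_split_points_alt
    split
    · next _ => rw [hc, (PySem.List.sorted_eq_nil_iff _ _ _).2 rfl]; simp [mspGreedy]
    · next t hsome =>
      rw [hc] at hsome
      have := PySem.List.min?_mem hsome
      simp at this
  | succ n ih =>
    intro G P hG
    unfold match_split_points_alt
    split
    · next hnone =>
      have hc : mspCands gap G P = [] := (PySem.List.min?_eq_none_iff _ _).1 hnone
      rw [hc, (PySem.List.sorted_eq_nil_iff _ _ _).2 rfl]
      simp [mspGreedy]
    · next t hsome =>
      have htmem : t ∈ mspCands gap G P := PySem.List.min?_mem hsome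
      have hne : mspCands gap G P ≠ [] := by
        intro h; rw [h] at htmem; simp at htmem
      obtain ⟨hd, tl, hsorted⟩ :
          ∃ hd tl, PySem.List.sorted (mspCands gap G P) mspKey false = hd :: tl := by
        cases hs : PySem.List.sorted (mspCands gap G P) mspKey false with
        | nil => exact absurd ((PySem.List.sorted_eq_nil_iff _ _ _).1 hs) hne
        | cons hd tl => exact ⟨hd, tl, rfl⟩
      have hhdmem : hd ∈ mspCands gap G P :=
        (PySem.List.sorted_perm (mspCands gap G P) mspKey false).mem_iff.1
          (hsorted ▸ List.mem_cons_self ..)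
      have hkeyle : mspKey hd ≤ mspKey t :=
        PySem.List.key_head_sorted_le (mspCands gap G P) mspKey hsorted t htmem
      have hkeyge : mspKey t ≤ mspKey hd := PySem.List.min?_isMin hsome hd hhdmem
      have hht : hd = t := mspKey_injective (le_antisymm hkeyle hkeyge)
      subst hht
      obtain ⟨d, g, p⟩ := hd
      have hglen : (G.filter (fun x => x ≠ g)).length < G.length :=
        List.length_filter_lt_length_iff_exists.2 ⟨g, (msp_mem_cands htmem).1, by simp⟩
      rw [hsorted, mspGreedy]
      congr 1
      rw [← ih (G.filter (fun x => x ≠ g)) (P.filter (fun x => x ≠ p))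
        (Nat.le_of_lt_succ (Nat.lt_of_lt_of_le hglen hG))]
      rw [msp_cands_filter, msp_sorted_filter, hsorted, List.filter_cons_of_neg (by simp)]

-- ===== VERDICT (by name: the statement is the Claim_ definition above) =====
theorem match_split_points_spec : Claim_equal_match_split_points := by
  intro gts preds gap _
  unfold Spec_match_split_points match_split_points
  rw [msp_loop_eq gap _ _ _ PySem.Set.empty PySem.Set.empty []
    (fun x => by simp [PySem.Dict.contains_empty, PySem.Set.empty, PySem.Set.contains])
    (fun x => by simp [PySem.Dict.contains_empty, PySem.Set.empty, PySem.Set.contains])]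
  rw [← msp_filter_eq_takeWhile gap _
    ((PySem.List.sorted_pairwise
        (gts.flatMap (fun g => preds.map (fun p => (|g - p|, g, p)))) mspKey).imp
      (fun h => msp_fst_le_of_key_le _ _ h))]
  rw [← msp_sorted_filter, ← msp_raw_filter]
  rw [msp_fold_greedy, List.nil_append]
  have hft : List.filter (fun t =>
        !(PySem.Set.contains PySem.Set.empty t.2.1) && !(PySem.Set.contains PySem.Set.empty t.2.2))
      (PySem.List.sorted (mspCands gap gts preds) mspKey false)
      = PySem.List.sorted (mspCands gap gts preds) mspKey false := by
    apply List.filter_eq_self.2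
    intro t _
    simp [PySem.Set.contains, PySem.Set.empty]
  rw [hft]
  exact msp_greedy_extract gap gts.length gts preds le_rfl
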